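-- pv_equiv track=rewrite | github.com/fairoos-nm/Game-of-Life | Game_of_life.py | count_alive_neighbours
-- ===== SOURCE A (Python) =====
-- def neighbours_of_position(matrix, position):
--
--     """ for providing neighbours of a particular position and return all the eight neighbours of that position """
--
--     for sub_list in matrix:
--         for j in range(len(matrix)):
--             for i in range(len(sub_list)):
--                 my_pos = [j, i]
--                 if my_pos == position:
--                     neighbours_list = [[j-1, i-1], [j-1, i], [j-1, i+1], [j, i-1], [j, i+1],[j+1, i-1],[j+1, i],[j+1, i+1]]
--
--                     return  neighbours_list
--
-- def real_neighbours(neighbours_list):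
--     """provide onboard neighbours of all position form total neighbours """
--
--     a = []
--     for neighbour in neighbours_list:
--         for x in neighbour:
--             if x < 0 or x > 2:
--                 neighbour.remove(x)
--         a.append(neighbour)
--         for i in a:
--             if len(i) == 1:
--                 a.remove(i)
--     return a
--
-- def count_alive_neighbours(matrix):
--     """count number of living neighbours (1) of each position in a matrix """
--
--     rows = len(matrix)
--     cols = len(matrix[0])
--     result = [[None for i in range(cols)] for j in range(rows)]
--
--     for i in range(len(matrix)):
--         for j in range(len(matrix[0])):
--             position = [i,j]
--             count = 0
--             neib = real_neighbours(neighbours_of_position(matrix, position))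
--             for a in neib:
--                 x = a[0]
--                 y = a[1]
--                 f = matrix[x]
--                 n = f[y]
--                 if n  == 1:
--                     count = count + 1
--             result[i][j] = count
--     return result
-- ===== SOURCE B (Python) =====
-- def count_alive_neighbours(matrix):
--     """count number of living neighbours (1) of each position in a matrix """
--     rows = len(matrix)
--     cols = len(matrix[0])
--     offsets = [(-1, -1), (-1, 0), (-1, 1), (0, -1), (0, 1), (1, -1), (1, 0), (1, 1)]
--     return [[sum(1 for dx, dy in offsets
--                  if 0 <= i + dx <= 2 and 0 <= j + dy <= 2 and matrix[i + dx][j + dy] == 1)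
--              for j in range(cols)]
--             for i in range(rows)]
-- ===== Notes on version B (the rewrite author's own statement) =====
-- stated objective: faster
-- what changed: B replaces A's per-cell rescan of the whole matrix (neighbours_of_position) and its remove-while-iterating list filtering (real_neighbours) by a single double loop that checks the 8 neighbour offsets directly against the board bounds 0..2.
import Mathlib
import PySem

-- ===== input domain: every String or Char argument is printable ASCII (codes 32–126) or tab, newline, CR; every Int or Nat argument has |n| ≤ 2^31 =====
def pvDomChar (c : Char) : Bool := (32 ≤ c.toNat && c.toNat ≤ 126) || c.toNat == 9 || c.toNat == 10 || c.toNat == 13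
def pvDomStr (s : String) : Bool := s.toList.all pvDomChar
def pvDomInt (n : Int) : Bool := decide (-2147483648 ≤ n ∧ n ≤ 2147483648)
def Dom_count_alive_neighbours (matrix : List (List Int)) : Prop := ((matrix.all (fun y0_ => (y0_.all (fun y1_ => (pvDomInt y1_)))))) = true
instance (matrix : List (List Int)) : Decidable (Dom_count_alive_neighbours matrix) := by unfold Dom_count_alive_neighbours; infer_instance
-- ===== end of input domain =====

-- B replaces A's per-cell matrix rescans and remove-while-iterating filtering by one direct
-- double loop that checks the 8 neighbour offsets against the fixed 0..2 board bounds
-- (asymptotically faster). Note: A (and its port) counts neighbours inside the fixed 3x3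
-- window with coordinates 0..2, exactly as the Python does.


-- ===== PORT A =====

-- Python's `for x in lst: if bad(x): lst.remove(x)` — iteration with in-place removal:
-- the iterator keeps its numeric index while `remove` deletes the first equal element.
def pyRemoveLoop {α : Type} [DecidableEq α] (bad : α → Bool) (l : List α) (idx : Nat) : List α :=
  if h : idx < l.length then
    let x := l[idx]
    if bad x then pyRemoveLoop bad (l.erase x) (idx + 1)
    else pyRemoveLoop bad l (idx + 1)
  else l
termination_by l.length - idx
decreasing_by
  · have hx : (l.erase l[idx]).length = l.length - 1 :=
      List.length_erase_of_mem (List.getElem_mem h)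
    omega
  · omega

-- triple loop with early return; `None` where the Python returns None
def neighbours_of_position (matrix : List (List Int)) (position : List Int) :
    Option (List (List Int)) :=
  matrix.findSome? (fun sub_list =>
    (((List.range matrix.length).flatMap
        (fun j => (List.range sub_list.length).map (fun i => (j, i)))).findSome?
      (fun p =>
        if ([(p.1 : Int), (p.2 : Int)] : List Int) = position then
          some [[(p.1 : Int) - 1, (p.2 : Int) - 1], [(p.1 : Int) - 1, (p.2 : Int)],
                [(p.1 : Int) - 1, (p.2 : Int) + 1], [(p.1 : Int), (p.2 : Int) - 1],
                [(p.1 : Int), (p.2 : Int) + 1], [(p.1 : Int) + 1, (p.2 : Int) - 1],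
                [(p.1 : Int) + 1, (p.2 : Int)], [(p.1 : Int) + 1, (p.2 : Int) + 1]]
        else none)))

def real_neighbours (neighbours_list : List (List Int)) : List (List Int) :=
  neighbours_list.foldl
    (fun a neighbour =>
      pyRemoveLoop (fun i => i.length == 1)
        (a ++ [pyRemoveLoop (fun x => decide (x < 0) || decide (x > 2)) neighbour 0]) 0)
    []

def count_alive_neighbours (matrix : List (List Int)) : List (List Int) :=
  let rows := matrix.length
  let cols := ((PySem.List.pyGet? matrix 0).getD []).length
  (List.range rows).map (fun (i : Nat) =>
    (List.range cols).map (fun (j : Nat) =>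
      let neib := real_neighbours ((neighbours_of_position matrix [(i : Int), (j : Int)]).getD [])
      neib.foldl (fun count a =>
        let x := (PySem.List.pyGet? a 0).getD 0
        let y := (PySem.List.pyGet? a 1).getD 0
        let f := (PySem.List.pyGet? matrix x).getD []
        let n := (PySem.List.pyGet? f y).getD 0
        if n = 1 then count + 1 else count) 0))

-- ===== PORT B =====
def count_alive_neighbours_alt (matrix : List (List Int)) : List (List Int) :=
  let rows := matrix.length
  let cols := ((PySem.List.pyGet? matrix 0).getD []).length
  let offsets : List (Int × Int) :=
    [(-1, -1), (-1, 0), (-1, 1), (0, -1), (0, 1), (1, -1), (1, 0), (1, 1)]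
  (List.range rows).map (fun (i : Nat) =>
    (List.range cols).map (fun (j : Nat) =>
      offsets.foldl (fun c d =>
        let x : Int := (i : Int) + d.1
        let y : Int := (j : Int) + d.2
        if decide (0 ≤ x) && decide (x ≤ 2) &&
            (decide (0 ≤ y) && (decide (y ≤ 2) &&
              ((PySem.List.pyGet? ((PySem.List.pyGet? matrix x).getD []) y).getD 0 == 1))) then
          c + 1
        else c) 0))

-- ===== PRECONDITION & SPEC =====
-- Exactly where the Python A returns instead of raising IndexError: the matrix is nonempty,
-- and either its first row is empty (all loops are empty) or there are at least 3 rows whose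
-- first three each have at least 3 entries (A reads cells with both coordinates in 0..2).
def Pre_count_alive_neighbours (matrix : List (List Int)) : Prop :=
  matrix ≠ [] ∧
    ((matrix.getD 0 []).length = 0 ∨
      (3 ≤ matrix.length ∧ 3 ≤ (matrix.getD 0 []).length ∧
        3 ≤ (matrix.getD 1 []).length ∧ 3 ≤ (matrix.getD 2 []).length))
instance (matrix : List (List Int)) : Decidable (Pre_count_alive_neighbours matrix) := by
  unfold Pre_count_alive_neighbours; infer_instance

def pvWitness_count_alive_neighbours : List (List Int) := [[1, 0, 1], [0, 1, 0], [1, 1, 0]]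

def Spec_count_alive_neighbours (matrix : List (List Int)) (out : List (List Int)) : Prop := out = count_alive_neighbours_alt matrix
instance (matrix : List (List Int)) (out : List (List Int)) : Decidable (Spec_count_alive_neighbours matrix out) := by unfold Spec_count_alive_neighbours; infer_instance

-- ===== CLAIM (what is proved, stated in full; the proofs are below) =====
def Claim_equal_count_alive_neighbours : Prop := ∀ (matrix : List (List Int)), Dom_count_alive_neighbours matrix → Pre_count_alive_neighbours matrix → Spec_count_alive_neighbours matrix (count_alive_neighbours matrix)

-- ===== LEMMAS AND PROOFS =====

theorem pyRemoveLoop_stop {α : Type} [DecidableEq α] (bad : α → Bool) (l : List α) (idx : Nat)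
    (h : ¬ idx < l.length) : pyRemoveLoop bad l idx = l := by
  rw [pyRemoveLoop]; simp [h]

theorem pyRemoveLoop_shift {α : Type} [DecidableEq α] (bad : α → Bool) (x : α)
    (hx : bad x = false) :
    ∀ (n : Nat) (l : List α) (i : Nat), l.length - i ≤ n →
      pyRemoveLoop bad (x :: l) (i + 1) = x :: pyRemoveLoop bad l i := by
  intro n
  induction n with
  | zero =>
    intro l i hn
    rw [pyRemoveLoop_stop bad (x :: l) (i + 1) (by simp; omega),
        pyRemoveLoop_stop bad l i (by omega)]
  | succ n ih =>
    intro l i hn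
    by_cases hi : i < l.length
    · have hget : (x :: l)[i + 1]'(by simpa using Nat.succ_lt_succ hi) = l[i] := by
        simp
      by_cases hb : bad l[i] = true
      · have hne : (x == l[i]) = false := by
          simp only [beq_eq_false_iff_ne]; intro he; rw [← he] at hb; simp [hx] at hb
        have hlen : (l.erase l[i]).length = l.length - 1 :=
          List.length_erase_of_mem (List.getElem_mem hi)
        rw [pyRemoveLoop, dif_pos (by simp; omega)]
        simp only [hget, hb, if_pos]
        rw [List.erase_cons, if_neg (by simp_all)]
        rw [ih (l.erase l[i]) (i + 1) (by omega)]
        conv_rhs => rw [pyRemoveLoop, dif_pos hi]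
        simp [hb]
      · rw [pyRemoveLoop, dif_pos (by simp; omega)]
        simp only [hget, hb, if_neg, Bool.false_eq_true, not_false_iff]
        rw [ih l (i + 1) (by omega)]
        conv_rhs => rw [pyRemoveLoop, dif_pos hi]
        simp [hb]
    · rw [pyRemoveLoop_stop bad (x :: l) (i + 1) (by simp; omega),
          pyRemoveLoop_stop bad l i hi]

theorem pyRemoveLoop_append_singleton {α : Type} [DecidableEq α] (bad : α → Bool) :
    ∀ (a : List α) (e : α), (∀ z ∈ a, bad z = false) →
      pyRemoveLoop bad (a ++ [e]) 0 = if bad e then a else a ++ [e] := by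
  intro a
  induction a with
  | nil =>
    intro e _
    rw [pyRemoveLoop, dif_pos (by simp)]
    simp only [List.nil_append, List.getElem_cons_zero]
    by_cases hb : bad e = true
    · simp [hb, pyRemoveLoop_stop]
    · simp only [hb, Bool.false_eq_true, if_neg, not_false_iff]
      rw [pyRemoveLoop_stop bad [e] 1 (by simp)]
  | cons x a ih =>
    intro e hgood
    have hx : bad x = false := hgood x (by simp)
    rw [List.cons_append, pyRemoveLoop, dif_pos (by simp)]
    simp only [List.getElem_cons_zero, hx, Bool.false_eq_true, if_neg, not_false_iff]
    have := pyRemoveLoop_shift bad x hx (a ++ [e]).length (a ++ [e]) 0 (by omega)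
    rw [this, ih e (fun z hz => hgood z (by simp [hz]))]
    by_cases hb : bad e = true <;> simp [hb]

def pvGood (v : Int) : Bool := !(decide (v < 0) || decide (v > 2))

theorem filt2 (bad : Int → Bool) (p q : Int) :
    pyRemoveLoop bad [p, q] 0 = if bad p then [q] else if bad q then [p] else [p, q] := by
  rw [pyRemoveLoop, dif_pos (by simp)]
  simp only [List.getElem_cons_zero]
  by_cases hp : bad p = true
  · simp only [hp, if_pos]
    rw [List.erase_cons, if_pos (by simp)]
    rw [pyRemoveLoop_stop bad [q] 1 (by simp)]
  · simp only [hp, Bool.false_eq_true, if_neg, not_false_iff]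
    rw [pyRemoveLoop, dif_pos (by simp)]
    simp only [List.getElem_cons_succ, List.getElem_cons_zero]
    by_cases hq : bad q = true
    · have hne : (p == q) = false := by
        simp only [beq_eq_false_iff_ne]; intro he; rw [he] at hp; exact hp hq
      simp only [hq, if_pos]
      rw [List.erase_cons, if_neg (by simp_all), List.erase_cons, if_pos (by simp)]
      rw [pyRemoveLoop_stop bad [p] 2 (by simp)]
    · simp only [hq, Bool.false_eq_true, if_neg, not_false_iff]
      rw [pyRemoveLoop_stop bad [p, q] 2 (by simp)]

theorem real_neighbours_aux :
    ∀ (nl a : List (List Int)), (∀ nb ∈ nl, ∃ p q, nb = [p, q]) →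
      (∀ z ∈ a, (z.length == 1) = false) →
      nl.foldl
        (fun a neighbour =>
          pyRemoveLoop (fun i => i.length == 1)
            (a ++ [pyRemoveLoop (fun x => decide (x < 0) || decide (x > 2)) neighbour 0]) 0)
        a = a ++ nl.filter (fun l => l.all pvGood) := by
  intro nl
  induction nl with
  | nil => intro a _ _; simp
  | cons nb nl ih =>
    intro a hsh hinv
    obtain ⟨p, q, rfl⟩ := hsh nb (by simp)
    simp only [List.foldl_cons]
    rw [filt2]
    by_cases hp : (decide (p < 0) || decide (p > 2)) = true
    · rw [if_pos hp]
      rw [pyRemoveLoop_append_singleton _ a [q] hinv]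
      simp only [List.length_cons, List.length_nil, beq_self_eq_true, if_pos]
      rw [ih a (fun z hz => hsh z (by simp [hz])) hinv]
      rw [List.filter_cons, if_neg (by simp [pvGood, hp])]
    · rw [if_neg hp]
      by_cases hq : (decide (q < 0) || decide (q > 2)) = true
      · rw [if_pos hq]
        rw [pyRemoveLoop_append_singleton _ a [p] hinv]
        simp only [List.length_cons, List.length_nil, beq_self_eq_true, if_pos]
        rw [ih a (fun z hz => hsh z (by simp [hz])) hinv]
        rw [List.filter_cons, if_neg (by simp [pvGood, hq])]
      · rw [if_neg hq]
        rw [pyRemoveLoop_append_singleton _ a [p, q] hinv]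
        simp only [List.length_cons, List.length_nil]
        rw [if_neg (by simp)]
        rw [ih (a ++ [[p, q]]) (fun z hz => hsh z (by simp [hz]))
            (fun z hz => by
              rcases List.mem_append.mp hz with h | h
              · exact hinv z h
              · simp at h; simp [h])]
        rw [List.filter_cons, if_pos (by simp [pvGood]; simp at hp hq; omega)]
        simp
  
theorem real_neighbours_eq_filter (nl : List (List Int))
    (h : ∀ nb ∈ nl, ∃ p q, nb = [p, q]) :
    real_neighbours nl = nl.filter (fun l => l.all pvGood) := by
  have := real_neighbours_aux nl [] h (by simp)
  simpa [real_neighbours] using this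

theorem findSome?_pair {beta : Type} (g : Nat → Nat → beta) (i j : Nat) :
    ∀ (l : List (Nat × Nat)), (i, j) ∈ l →
      l.findSome? (fun p =>
        if ([(p.1 : Int), (p.2 : Int)] : List Int) = [(i : Int), (j : Int)] then
          some (g p.1 p.2) else none) = some (g i j) := by
  intro l
  induction l with
  | nil => intro h; simp at h
  | cons hd t ih =>
    intro hmem
    rw [List.findSome?_cons]
    by_cases hc : ([(hd.1 : Int), (hd.2 : Int)] : List Int) = [(i : Int), (j : Int)]
    · have h1 : hd.1 = i ∧ hd.2 = j := by
        simp only [List.cons.injEq, Int.natCast_inj, and_true] at hc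
        exact ⟨hc.1, hc.2⟩
      simp [h1.1, h1.2]
    · have hne : hd ≠ (i, j) := by
        intro he; exact hc (by rw [he])
      have : (i, j) ∈ t := by
        rcases List.mem_cons.mp hmem with h | h
        · exact absurd h.symm hne
        · exact h
      rw [if_neg hc]
      simpa using ih this

theorem nop_eq (r0 : List Int) (rest : List (List Int)) (i j : Nat)
    (hi : i < (r0 :: rest : List (List Int)).length) (hj : j < r0.length) :
    neighbours_of_position (r0 :: rest) [(i : Int), (j : Int)] =
      some [[(i : Int) - 1, (j : Int) - 1], [(i : Int) - 1, (j : Int)],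
            [(i : Int) - 1, (j : Int) + 1], [(i : Int), (j : Int) - 1],
            [(i : Int), (j : Int) + 1], [(i : Int) + 1, (j : Int) - 1],
            [(i : Int) + 1, (j : Int)], [(i : Int) + 1, (j : Int) + 1]] := by
  rw [neighbours_of_position, List.findSome?_cons]
  rw [findSome?_pair (fun a b =>
      ([[(a : Int) - 1, (b : Int) - 1], [(a : Int) - 1, (b : Int)],
        [(a : Int) - 1, (b : Int) + 1], [(a : Int), (b : Int) - 1],
        [(a : Int), (b : Int) + 1], [(a : Int) + 1, (b : Int) - 1],
        [(a : Int) + 1, (b : Int)], [(a : Int) + 1, (b : Int) + 1]] : List (List Int))) i j _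
      (by simp only [List.mem_flatMap, List.mem_map, List.mem_range]
          exact ⟨i, hi, ⟨j, hj, rfl⟩⟩)]

theorem pyGet?_two_one (a b : Int) : PySem.List.pyGet? [a, b] 1 = some b := by
  simp [PySem.List.pyGet?, PySem.List.pyIdx?]

theorem step_eq (m : List (List Int)) (c x y : Int) :
    (if (pvGood x && (pvGood y && true)) = true then
       (if (PySem.List.pyGet? ((PySem.List.pyGet? m x).getD []) y).getD 0 = 1 then c + 1 else c)
     else c)
    = if (decide (0 ≤ x) && decide (x ≤ 2) &&
          (decide (0 ≤ y) && (decide (y ≤ 2) &&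
            ((PySem.List.pyGet? ((PySem.List.pyGet? m x).getD []) y).getD 0 == 1)))) = true then
        c + 1
      else c := by
  by_cases hx : (0 ≤ x ∧ x ≤ 2) <;> by_cases hy : (0 ≤ y ∧ y ≤ 2) <;>
    by_cases hv : (PySem.List.pyGet? ((PySem.List.pyGet? m x).getD []) y).getD 0 = 1 <;>
      first
        | (simp [pvGood, hv]; omega)
        | simp [pvGood, hv]

theorem cell_eq (r0 : List Int) (rest : List (List Int)) (i j : Nat)
    (hi : i < (r0 :: rest : List (List Int)).length) (hj : j < r0.length) :
    (real_neighbours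
        ((neighbours_of_position (r0 :: rest) [(i : Int), (j : Int)]).getD [])).foldl
      (fun (count : Int) a =>
        let x := (PySem.List.pyGet? a 0).getD 0
        let y := (PySem.List.pyGet? a 1).getD 0
        let f := (PySem.List.pyGet? (r0 :: rest) x).getD []
        let n := (PySem.List.pyGet? f y).getD 0
        if n = 1 then count + 1 else count) 0
    = ([(-1, -1), (-1, 0), (-1, 1), (0, -1), (0, 1), (1, -1), (1, 0), (1, 1)] :
        List (Int × Int)).foldl
      (fun (c : Int) d =>
        let x : Int := (i : Int) + d.1
        let y : Int := (j : Int) + d.2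
        if decide (0 ≤ x) && decide (x ≤ 2) &&
            (decide (0 ≤ y) && (decide (y ≤ 2) &&
              ((PySem.List.pyGet? ((PySem.List.pyGet? (r0 :: rest) x).getD []) y).getD 0 == 1))) then
          c + 1
        else c) 0 := by
  rw [nop_eq r0 rest i j hi hj]
  rw [Option.getD_some]
  rw [real_neighbours_eq_filter _ (by
    intro nb h
    simp only [List.mem_cons, List.not_mem_nil, or_false] at h
    rcases h with rfl | rfl | rfl | rfl | rfl | rfl | rfl | rfl <;> exact ⟨_, _, rfl⟩)]
  rw [List.foldl_filter]
  simp only [List.foldl_cons, List.foldl_nil, List.all_cons, List.all_nil,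
    PySem.List.pyGet?_zero_cons, pyGet?_two_one, Option.getD_some]
  simp only [step_eq]
  simp only [sub_eq_add_neg, add_zero]

-- ===== VERDICT (by name: the statement is the Claim_ definition above) =====
theorem count_alive_neighbours_spec : Claim_equal_count_alive_neighbours := by
  intro matrix _ hpre
  unfold Spec_count_alive_neighbours
  obtain ⟨hne, -⟩ := hpre
  obtain ⟨r0, rest, rfl⟩ : ∃ r0 rest, matrix = r0 :: rest := by
    cases matrix with
    | nil => exact absurd rfl hne
    | cons r0 rest => exact ⟨r0, rest, rfl⟩
  unfold count_alive_neighbours count_alive_neighbours_alt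
  simp only [PySem.List.pyGet?_zero_cons, Option.getD_some]
  apply List.map_congr_left
  intro i hi
  apply List.map_congr_left
  intro j hj
  rw [List.mem_range] at hi hj
  exact cell_eq r0 rest i j (by simpa using hi) hj
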